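-- pv_equiv track=rewrite | github.com/Judahmeek/OldCode | Python/Python 2/longProcessTime.py | serverPool
-- ===== SOURCE A (Python) =====
-- import operator
--
-- def serverPool(jobs, servers):
--     jobs = sorted([(time, index) for index, time in enumerate(jobs)], key=lambda x: x[0], reverse=True)
--     result = [[] for i in range(servers)]
--     times = [0 for i in range(servers)]
--
--     for i in range(len(jobs)):
--         available = min(enumerate(times), key=operator.itemgetter(1))[0]
--         times[available] = times[available] + jobs[i][0]
--         result[available].append(jobs[i][1])
--     return result
-- ===== SOURCE B (Python) =====
-- from bisect import insort
--
-- def serverPool(jobs, servers):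
--     # Priority-pool strategy: keep the servers as a list of (load, index) pairs
--     # sorted ascending, pop the least-loaded one and re-insert it with bisect,
--     # instead of rescanning all server loads for every job.
--     result = [[] for _ in range(servers)]
--     pool = [(0, k) for k in range(servers)]
--     for t, i in sorted(((t, i) for i, t in enumerate(jobs)),
--                        key=lambda p: p[0], reverse=True):
--         load, k = pool.pop(0)
--         result[k].append(i)
--         insort(pool, (load + t, k))
--     return result
-- ===== Notes on version B (the rewrite author's own statement) =====
-- stated objective: faster
-- what changed: Instead of rescanning all server loads with min(enumerate(times)) for every job, B keeps the servers as a (load, index) pool sorted ascending, pops the head and re-inserts the updated pair with bisect.insort.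
import Mathlib
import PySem

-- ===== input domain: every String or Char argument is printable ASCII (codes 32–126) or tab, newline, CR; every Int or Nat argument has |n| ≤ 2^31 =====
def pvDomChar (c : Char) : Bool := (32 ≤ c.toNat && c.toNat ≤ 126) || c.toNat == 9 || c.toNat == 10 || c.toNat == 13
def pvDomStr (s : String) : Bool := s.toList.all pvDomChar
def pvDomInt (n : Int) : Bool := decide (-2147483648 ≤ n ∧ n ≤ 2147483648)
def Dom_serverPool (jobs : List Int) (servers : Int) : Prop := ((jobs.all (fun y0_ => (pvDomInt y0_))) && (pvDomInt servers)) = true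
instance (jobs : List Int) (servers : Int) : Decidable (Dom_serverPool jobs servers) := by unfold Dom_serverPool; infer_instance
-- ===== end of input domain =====

-- B replaces A's per-job linear scan for the least-loaded server by a pool of
-- (load, index) pairs kept sorted, popping the head and re-inserting (objective: faster; a timing run measured B faster).


-- ===== PORT A =====
-- one loop iteration of A: scan enumerate(times) for the first least-loaded server
-- (Python's min with key); the 'none' branch is unreachable under Pre_ (Python raises ValueError there)
def serverPoolStepA (st : List Int × List (List Int)) (job : Int × Int) :
    List Int × List (List Int) :=
  match PySem.List.min? (PySem.List.enumerate st.1) (fun p => p.2) with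
  | none => st
  | some m =>
      (PySem.List.pySetD st.1 m.1 (PySem.List.pyGetD st.1 m.1 0 + job.1),
       PySem.List.pySetD st.2 m.1 (PySem.List.pyGetD st.2 m.1 [] ++ [job.2]))

def serverPool (jobs : List Int) (servers : Int) : List (List Int) :=
  let jobsS : List (Int × Int) :=
    PySem.List.sorted ((PySem.List.enumerate jobs).map (fun p => (p.2, p.1))) (fun x => x.1) true
  let result : List (List Int) := (PySem.List.pyRange 0 servers 1).map (fun _ => ([] : List Int))
  let times : List Int := (PySem.List.pyRange 0 servers 1).map (fun _ => (0 : Int))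
  let st := (PySem.List.pyRange 0 (PySem.List.len jobsS) 1).foldl
    (fun st i => serverPoolStepA st (PySem.List.pyGetD jobsS i ((0 : Int), (0 : Int))))
    (times, result)
  st.2

-- ===== PORT B =====
-- bisect.insort on a lexicographically sorted list of (load, index) pairs
def insortPair (p : Int × Int) : List (Int × Int) → List (Int × Int)
  | [] => [p]
  | q :: rest =>
      if p.1 < q.1 ∨ (p.1 = q.1 ∧ p.2 < q.2) then p :: q :: rest else q :: insortPair p rest

-- one loop iteration of B: pop the head of the sorted pool, re-insert with insort;
-- the '[]' branch is unreachable under Pre_ (Python's pool.pop(0) raises IndexError there)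
def serverPoolStepB (st : List (Int × Int) × List (List Int)) (job : Int × Int) :
    List (Int × Int) × List (List Int) :=
  match st.1 with
  | [] => st
  | (load, k) :: rest =>
      (insortPair (load + job.1, k) rest,
       PySem.List.pySetD st.2 k (PySem.List.pyGetD st.2 k [] ++ [job.2]))

def serverPool_alt (jobs : List Int) (servers : Int) : List (List Int) :=
  let result : List (List Int) := (PySem.List.pyRange 0 servers 1).map (fun _ => ([] : List Int))
  let pool : List (Int × Int) := (PySem.List.pyRange 0 servers 1).map (fun k => ((0 : Int), k))
  let order : List (Int × Int) :=
    PySem.List.sorted ((PySem.List.enumerate jobs).map (fun p => (p.2, p.1))) (fun x => x.1) true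
  let st := order.foldl serverPoolStepB (pool, result)
  st.2

-- ===== PRECONDITION & SPEC =====
-- Pre_ excludes servers ≤ 0 with a nonempty job list: there A raises ValueError
-- (min() of an empty sequence) and B raises IndexError (pop from empty list).
def Pre_serverPool (jobs : List Int) (servers : Int) : Prop := jobs = [] ∨ 1 ≤ servers
instance (jobs : List Int) (servers : Int) : Decidable (Pre_serverPool jobs servers) := by
  unfold Pre_serverPool; infer_instance

def pvWitness_serverPool : List Int × Int := ([3, 1, 2, 1], 2)

def Spec_serverPool (jobs : List Int) (servers : Int) (out : List (List Int)) : Prop :=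
  out = serverPool_alt jobs servers
instance (jobs : List Int) (servers : Int) (out : List (List Int)) :
    Decidable (Spec_serverPool jobs servers out) := by unfold Spec_serverPool; infer_instance

-- ===== CLAIM (what is proved, stated in full; the proofs are below) =====
def Claim_equal_serverPool : Prop := ∀ (jobs : List Int) (servers : Int),
  Dom_serverPool jobs servers → Pre_serverPool jobs servers →
  Spec_serverPool jobs servers (serverPool jobs servers)

-- ===== LEMMAS AND PROOFS =====

-- the strict lexicographic order B's pool is kept in
def lexLt (p q : Int × Int) : Prop := p.1 < q.1 ∨ (p.1 = q.1 ∧ p.2 < q.2)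

theorem lexLt_trans {p q r : Int × Int} (h1 : lexLt p q) (h2 : lexLt q r) : lexLt p r := by
  unfold lexLt at *; omega

theorem lexLt_total {p q : Int × Int} (hne : p.2 ≠ q.2) : lexLt p q ∨ lexLt q p := by
  unfold lexLt; omega

theorem insortPair_perm (p : Int × Int) (l : List (Int × Int)) :
    (insortPair p l).Perm (p :: l) := by
  induction l with
  | nil => simp [insortPair]
  | cons q rest ih =>
      by_cases h : p.1 < q.1 ∨ (p.1 = q.1 ∧ p.2 < q.2)
      · simp [insortPair, h]
      · simpa [insortPair, h] using ((ih.cons q).trans (List.Perm.swap p q rest))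

theorem insortPair_pairwise (p : Int × Int) (l : List (Int × Int))
    (hl : l.Pairwise lexLt) (hne : ∀ q ∈ l, q.2 ≠ p.2) :
    (insortPair p l).Pairwise lexLt := by
  induction l with
  | nil => simp [insortPair]
  | cons q rest ih =>
      rcases hl with _ | ⟨hq, hrest⟩
      by_cases h : p.1 < q.1 ∨ (p.1 = q.1 ∧ p.2 < q.2)
      · have hpq : lexLt p q := h
        simp only [insortPair, if_pos h]
        refine List.Pairwise.cons ?_ (List.Pairwise.cons hq hrest)
        intro y hy
        rcases List.mem_cons.mp hy with hy | hy
        · exact hy ▸ hpq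
        · exact lexLt_trans hpq (hq y hy)
      · have hqp : lexLt q p := by
          rcases lexLt_total (p := q) (q := p) (fun hs => (hne q (by simp)) hs) with h' | h'
          · exact h'
          · exact absurd h' h
        simp only [insortPair, if_neg h]
        refine List.Pairwise.cons ?_ (ih hrest (fun y hy => hne y (by simp [hy])))
        intro y hy
        rcases List.mem_cons.mp ((insortPair_perm p rest).mem_iff.mp hy) with hy' | hy'
        · exact hy' ▸ hqp
        · exact hq y hy'

-- the running first-min loop lands on the lexicographically minimal (snd,fst) pair,
-- given strictly increasing fst (positions)
theorem foldl_min_first (l : List (Int × Int)) (a m : Int × Int)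
    (h1 : ∀ y ∈ l, a.1 < y.1) (h2 : l.Pairwise (fun p q => p.1 < q.1))
    (hm : m = a ∨ m ∈ l)
    (hma : m.2 < a.2 ∨ (m.2 = a.2 ∧ m.1 ≤ a.1))
    (hml : ∀ y ∈ l, m.2 < y.2 ∨ (m.2 = y.2 ∧ m.1 ≤ y.1)) :
    l.foldl (fun acc y => if y.2 < acc.2 then y else acc) a = m := by
  induction l generalizing a with
  | nil =>
      rcases hm with h | h
      · exact h ▸ rfl
      · simp at h
  | cons q l ih =>
      rcases h2 with _ | ⟨hq, hl⟩
      have hq' := h1 q (by simp)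
      have hmq := hml q (by simp)
      simp only [List.foldl_cons]
      by_cases hc : q.2 < a.2
      · rw [if_pos hc]
        refine ih q hq hl ?_ hmq (fun y hy => hml y (by simp [hy]))
        rcases hm with h | h
        · exfalso
          have e2 : m.2 = a.2 := by rw [h]
          have e1 : m.1 = a.1 := by rw [h]
          omega
        · rcases List.mem_cons.mp h with h' | h'
          · exact Or.inl h'
          · exact Or.inr h'
      · rw [if_neg hc]
        refine ih a (fun y hy => h1 y (by simp [hy])) hl ?_ hma
          (fun y hy => hml y (by simp [hy]))
        rcases hm with h | h
        · exact Or.inl h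
        · rcases List.mem_cons.mp h with h' | h'
          · exfalso
            have e2 : m.2 = q.2 := by rw [h']
            have e1 : m.1 = q.1 := by rw [h']
            omega
          · exact Or.inr h'

theorem min?_cons (x : Int × Int) (l : List (Int × Int)) :
    PySem.List.min? (x :: l) (fun p => p.2)
      = some (l.foldl (fun m y => if y.2 < m.2 then y else m) x) := by
  induction l generalizing x with
  | nil => rfl
  | cons y l ih =>
      have step : PySem.List.min? (x :: y :: l) (fun p => p.2)
          = PySem.List.min? ((if y.2 < x.2 then y else x) :: l) (fun p => p.2) := by
        by_cases h : y.2 < x.2 <;> simp [PySem.List.min?, h]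
      rw [step, ih, List.foldl_cons]

-- A's server selection: under B's pool invariant, min(enumerate(times), key=time)
-- is exactly the swapped head of the sorted pool
theorem min?_of_pool (times : List Int) (t k : Int) (rest : List (Int × Int))
    (hsorted : (((t, k) :: rest) : List (Int × Int)).Pairwise lexLt)
    (hperm : (((t, k) :: rest) : List (Int × Int)).Perm
      ((PySem.List.enumerate times).map (fun p => (p.2, p.1)))) :
    PySem.List.min? (PySem.List.enumerate times) (fun p => p.2) = some (k, t) := by
  rcases hsorted with _ | ⟨hhd, _⟩
  have hmem : ((k, t) : Int × Int) ∈ PySem.List.enumerate times := by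
    have : ((t, k) : Int × Int) ∈ (PySem.List.enumerate times).map (fun p => (p.2, p.1)) :=
      hperm.mem_iff.mp (by simp)
    rcases List.mem_map.mp this with ⟨p, hp, hpe⟩
    have h1 : p.2 = t := congrArg Prod.fst hpe
    have h2 : p.1 = k := congrArg Prod.snd hpe
    simpa [← h1, ← h2] using hp
  have hmin : ∀ y ∈ PySem.List.enumerate times, t < y.2 ∨ (t = y.2 ∧ k ≤ y.1) := by
    intro y hy
    have hmm : ((y.2, y.1) : Int × Int) ∈ ((t, k) :: rest : List (Int × Int)) :=
      hperm.mem_iff.mpr (List.mem_map.mpr ⟨y, hy, rfl⟩)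
    rcases List.mem_cons.mp hmm with hh | hh
    · have h1 : y.2 = t := congrArg Prod.fst hh
      have h2 : y.1 = k := congrArg Prod.snd hh
      omega
    · have := hhd _ hh
      unfold lexLt at this; dsimp at this; omega
  cases he : PySem.List.enumerate times with
  | nil => simp [he] at hmem
  | cons e es =>
      have hpw := PySem.List.pairwise_lt_enumerate times 0
      rw [he] at hpw
      rcases hpw with _ | ⟨he1, hes⟩
      rw [he] at hmem hmin
      rw [min?_cons]
      congr 1
      refine foldl_min_first es e (k, t) he1 hes ?_ ?_ ?_
      · rcases List.mem_cons.mp hmem with h | h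
        · exact Or.inl h
        · exact Or.inr h
      · have := hmin e (by simp); dsimp; omega
      · intro y hy; have := hmin y (by simp [hy]); dsimp; omega

theorem enumerate_set {α : Type} (xs : List α) (j : Nat) (v : α) (s : Int) :
    PySem.List.enumerate (xs.set j v) s
      = (PySem.List.enumerate xs s).set j (s + (j : Int), v) := by
  induction xs generalizing j s with
  | nil => simp [PySem.List.enumerate_nil]
  | cons x xs ih =>
      cases j with
      | zero => simp [PySem.List.enumerate_cons]
      | succ j =>
          simp only [List.set, PySem.List.enumerate_cons, ih, List.set]
          have h : s + ((j : Int) + 1) = s + 1 + (j : Int) := by ring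
          norm_num
          rw [h]

-- one synchronized step of the two loops preserves the pool invariant
theorem step_sync (times : List Int) (pool : List (Int × Int)) (res : List (List Int))
    (job : Int × Int) (hne : times ≠ [])
    (hsorted : pool.Pairwise lexLt)
    (hperm : pool.Perm ((PySem.List.enumerate times).map (fun p => (p.2, p.1)))) :
    (serverPoolStepA (times, res) job).2 = (serverPoolStepB (pool, res) job).2 ∧
    (serverPoolStepA (times, res) job).1.length = times.length ∧
    (serverPoolStepB (pool, res) job).1.Pairwise lexLt ∧
    (serverPoolStepB (pool, res) job).1.Perm
      ((PySem.List.enumerate (serverPoolStepA (times, res) job).1).map (fun p => (p.2, p.1))) := by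
  cases pool with
  | nil =>
      exfalso
      have := hperm.length_eq
      simp [PySem.List.length_enumerate] at this
      exact hne (List.eq_nil_of_length_eq_zero this.symm)
  | cons hd rest =>
  obtain ⟨t, k⟩ := hd
  have hmin := min?_of_pool times t k rest hsorted hperm
  -- locate (k, t) inside enumerate times
  have hmemkt : ((k, t) : Int × Int) ∈ PySem.List.enumerate times := by
    have : ((t, k) : Int × Int) ∈ (PySem.List.enumerate times).map (fun p => (p.2, p.1)) :=
      hperm.mem_iff.mp (by simp)
    rcases List.mem_map.mp this with ⟨p, hp, hpe⟩
    have h1 : p.2 = t := congrArg Prod.fst hpe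
    have h2 : p.1 = k := congrArg Prod.snd hpe
    simpa [← h1, ← h2] using hp
  rcases (PySem.List.mem_enumerate_iff times 0 (k, t)).mp hmemkt with ⟨j, hj, hje⟩
  have hk : k = (j : Int) := by
    have := congrArg Prod.fst hje; simpa using this
  have ht : t = times[j] := by
    have := congrArg Prod.snd hje; simpa using this
  -- the fst components of the pool are distinct positions
  have hnodup : (((t, k) :: rest).map Prod.snd).Nodup := by
    have h1 : (((t, k) :: rest).map Prod.snd).Perm
        ((PySem.List.enumerate times).map Prod.fst) := by
      have := hperm.map Prod.snd
      simpa [Function.comp] using this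
    have h2 : ((PySem.List.enumerate times).map Prod.fst).Nodup := by
      rw [PySem.List.map_fst_enumerate]
      exact PySem.List.nodup_pyRange_one _ _
    exact h1.nodup_iff.mpr h2
  have hknotin : ∀ q ∈ rest, q.2 ≠ k := by
    intro q hq hqe
    rcases hnodup with _ | ⟨hn, _⟩
    exact hn k (List.mem_map.mpr ⟨q, hq, hqe⟩) rfl
  -- unfold the two steps
  unfold serverPoolStepA serverPoolStepB
  rw [hmin]
  dsimp only
  have hset : PySem.List.pySetD times k (PySem.List.pyGetD times k 0 + job.1)
      = times.set j (t + job.1) := by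
    rw [hk, PySem.List.pySetD_natCast]
    congr 1
    rw [PySem.List.pyGetD_natCast, List.getD_eq_getElem?_getD, List.getElem?_eq_getElem hj]
    simp [ht]
  refine ⟨rfl, ?_, ?_, ?_⟩
  · rw [hset]; simp
  · exact insortPair_pairwise _ rest (by rcases hsorted with _ | ⟨_, h⟩; exact h)
      (by intro q hq hqe; exact hknotin q hq (by rw [hqe]))
  · -- permutation invariant for the new pool
    rw [hset, enumerate_set]
    have hEget : (PySem.List.enumerate times)[j]'(by simp [PySem.List.length_enumerate, hj]) = (k, t) := by
      rw [PySem.List.getElem_enumerate]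
      simp [← hk, ← ht]
    set E := (PySem.List.enumerate times).map (fun p => ((p.2, p.1) : Int × Int)) with hE
    have hjE : j < E.length := by simp [hE, PySem.List.length_enumerate, hj]
    have hms : ((PySem.List.enumerate times).set j ((0 : Int) + (j : Int), t + job.1)).map
        (fun p => ((p.2, p.1) : Int × Int)) = E.set j (t + job.1, k) := by
      rw [hE, List.map_set]
      congr 2
      simp [hk]
    rw [hms]
    have hEj : E[j]'hjE = (t, k) := by
      simp only [hE, List.getElem_map, hEget]
    -- E = take j ++ (t,k) :: drop (j+1); set replaces the middle
    have hsplitE : E = E.take j ++ (t, k) :: E.drop (j + 1) := by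
      conv_lhs => rw [← List.take_append_drop j E, List.drop_eq_getElem_cons hjE, hEj]
    have hsplitSet : E.set j (t + job.1, k) = E.take j ++ (t + job.1, k) :: E.drop (j + 1) := by
      rw [List.set_eq_take_append_cons_drop, if_pos hjE]
    have hEperm : E.Perm ((t, k) :: (E.take j ++ E.drop (j + 1))) := by
      conv_lhs => rw [hsplitE]
      exact List.perm_middle
    have hrest : rest.Perm (E.take j ++ E.drop (j + 1)) := (hperm.trans hEperm).cons_inv
    rw [hsplitSet]
    exact ((insortPair_perm _ _).trans (hrest.cons _)).trans List.perm_middle.symm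

-- the two whole loops agree and preserve the invariant
theorem loop_sync (jl : List (Int × Int)) (times : List Int) (pool : List (Int × Int))
    (res : List (List Int)) (hne : times ≠ [])
    (hsorted : pool.Pairwise lexLt)
    (hperm : pool.Perm ((PySem.List.enumerate times).map (fun p => (p.2, p.1)))) :
    (jl.foldl serverPoolStepA (times, res)).2 = (jl.foldl serverPoolStepB (pool, res)).2 := by
  induction jl generalizing times pool res with
  | nil => rfl
  | cons job jl ih =>
      obtain ⟨hres, hlen, hsorted', hperm'⟩ := step_sync times pool res job hne hsorted hperm
      simp only [List.foldl_cons]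
      have h1 : serverPoolStepA (times, res) job
          = ((serverPoolStepA (times, res) job).1, (serverPoolStepA (times, res) job).2) := rfl
      have h2 : serverPoolStepB (pool, res) job
          = ((serverPoolStepB (pool, res) job).1, (serverPoolStepB (pool, res) job).2) := rfl
      rw [h1, h2, hres]
      exact ih _ _ _ (by intro h; rw [h] at hlen; exact hne (List.eq_nil_of_length_eq_zero hlen.symm)) hsorted' hperm'

-- the initial pool IS the swapped enumeration of the initial (all-zero) load list
theorem init_pool_eq (servers : Int) (hs : 1 ≤ servers) :
    ((PySem.List.pyRange 0 servers 1).map (fun k => ((0 : Int), k)))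
      = (PySem.List.enumerate ((PySem.List.pyRange 0 servers 1).map (fun _ => (0 : Int)))).map
          (fun p => (p.2, p.1)) := by
  rw [PySem.List.enumerate_eq_map_pyRange _ (0 : Int)]
  have hlen : PySem.List.len ((PySem.List.pyRange 0 servers 1).map (fun _ => (0 : Int))) = servers := by
    simp [PySem.List.length_pyRange_one]
    omega
  rw [hlen, List.map_map]
  refine List.map_congr_left ?_
  intro j hj
  rcases (PySem.List.mem_pyRange_one).mp hj with ⟨h0, h1⟩
  simp only [Function.comp_apply]
  rw [PySem.List.pyGetD_map_pyRange_of_nonneg _ servers j _ h0 h1]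

-- ===== VERDICT (by name: the statement is the Claim_ definition above) =====
theorem serverPool_spec : Claim_equal_serverPool := by
  intro jobs servers _ hpre
  unfold Spec_serverPool serverPool serverPool_alt
  dsimp only
  rw [PySem.List.foldl_pyRange_zero_pyGetD _ ((0 : Int), (0 : Int)) serverPoolStepA]
  rcases hpre with hje | hs
  · -- no jobs: both loops are empty, both return the same freshly built result list
    subst hje
    have : PySem.List.sorted ((PySem.List.enumerate ([] : List Int)).map (fun p => (p.2, p.1)))
        (fun x => x.1) true = [] := by
      rw [PySem.List.sorted_eq_nil_iff]; simp [PySem.List.enumerate_nil]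
    rw [this]
    rfl
  · -- at least one server: run the synchronized-loop argument
    refine loop_sync _ _ _ _ ?_ ?_ ?_
    · intro h
      have := congrArg List.length h
      simp [PySem.List.length_pyRange_one] at this
      omega
    · refine List.Pairwise.map _ ?_ (PySem.List.pairwise_lt_pyRange_one 0 servers)
      intro a b hab
      exact Or.inr ⟨rfl, hab⟩
    · rw [init_pool_eq servers hs]
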